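-- pv_equiv track=rewrite | github.com/ashafaei/OD-test | utils/experiment_merger.py | does_match
-- ===== SOURCE A (Python) =====
-- def does_match(record_a, record_b):
--     if len(record_a) != len(record_b):
--         return False
--     if len(record_a) == 0:
--         return True
--     if record_a[0] == record_b[0]:
--         return does_match(record_a[1:], record_b[1:])
--     else:
--         return False
-- ===== SOURCE B (Python) =====
-- def does_match(record_a, record_b):
--     n = len(record_a)
--     if n != len(record_b):
--         return False
--     for i in range(n):
--         if record_a[i] != record_b[i]:
--             return False
--     return True
-- ===== Notes on version B (the rewrite author's own statement) =====
-- stated objective: simpler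
-- what changed: Replaced A's self-recursion over list slices (which copies both remaining lists at every step) with a single explicit index loop that returns False at the first mismatch.
import Mathlib
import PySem

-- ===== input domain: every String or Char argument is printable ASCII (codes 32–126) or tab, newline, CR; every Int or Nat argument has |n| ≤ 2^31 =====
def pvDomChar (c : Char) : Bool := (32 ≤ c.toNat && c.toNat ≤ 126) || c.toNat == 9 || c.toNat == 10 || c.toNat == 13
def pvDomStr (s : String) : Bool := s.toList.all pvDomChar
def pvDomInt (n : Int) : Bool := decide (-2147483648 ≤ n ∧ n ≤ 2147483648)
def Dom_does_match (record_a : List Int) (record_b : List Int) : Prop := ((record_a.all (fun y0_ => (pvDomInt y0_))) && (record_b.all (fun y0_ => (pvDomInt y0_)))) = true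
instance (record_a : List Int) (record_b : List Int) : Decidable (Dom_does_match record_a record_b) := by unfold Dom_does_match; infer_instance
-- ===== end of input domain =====

-- B replaces A's self-recursion over list slices by one explicit index loop with the
-- same length guard and early exit on the first mismatch (objective: simpler).


-- ===== PORT A =====
-- A: compare lengths, then heads, then recurse on the tails (record_a[1:], record_b[1:]).
def does_match (record_a : List Int) (record_b : List Int) : Bool :=
  if record_a.length ≠ record_b.length then false
  else if record_a.length = 0 then true
  else if record_a.head? = record_b.head? then
    does_match (PySem.List.slice record_a (some 1) none)
               (PySem.List.slice record_b (some 1) none)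
  else false
termination_by record_a.length
decreasing_by simp [PySem.List.slice_from_one]; omega

-- ===== PORT B =====
-- B's loop: for i in range(n): if record_a[i] != record_b[i]: return False
def does_match_loop (a : List Int) (b : List Int) (n : Nat) (i : Nat) : Bool :=
  if i < n then
    if a.getD i 0 ≠ b.getD i 0 then false
    else does_match_loop a b n (i + 1)
  else true
termination_by n - i

def does_match_alt (record_a : List Int) (record_b : List Int) : Bool :=
  let n := record_a.length
  if n ≠ record_b.length then false
  else does_match_loop record_a record_b n 0

-- ===== PRECONDITION & SPEC =====
def Spec_does_match (record_a : List Int) (record_b : List Int) (out : Bool) : Prop := out = does_match_alt record_a record_b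
instance (record_a : List Int) (record_b : List Int) (out : Bool) : Decidable (Spec_does_match record_a record_b out) := by unfold Spec_does_match; infer_instance

-- ===== CLAIM (what is proved, stated in full; the proofs are below) =====
def Claim_equal_does_match : Prop := ∀ (record_a : List Int) (record_b : List Int), Dom_does_match record_a record_b → Spec_does_match record_a record_b (does_match record_a record_b)

-- ===== LEMMAS AND PROOFS =====

-- A computes list equality.
theorem does_match_eq_decide (a b : List Int) : does_match a b = decide (a = b) := by
  induction a generalizing b with
  | nil =>
    cases b <;> · unfold does_match; simp
  | cons x xs ih =>
    cases b with
    | nil => unfold does_match; simp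
    | cons y ys =>
      unfold does_match
      by_cases hlen : xs.length = ys.length
      · by_cases hxy : x = y
        · simp [hlen, hxy, PySem.List.slice_from_one, ih]
        · simp [hlen, hxy]
      · have : ¬ (x :: xs = y :: ys) := by
          intro h; apply hlen
          have := congrArg List.length h; simpa using this
        simp [hlen, this]

-- B's loop computes equality of the suffixes from index i, given equal lengths.
theorem does_match_loop_eq (a b : List Int) (h : a.length = b.length) (i : Nat) :
    does_match_loop a b a.length i = decide (a.drop i = b.drop i) := by
  by_cases hi : i < a.length
  · rw [does_match_loop]
    simp only [hi, if_true]
    have ha : a.drop i = a.getD i 0 :: a.drop (i + 1) := by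
      rw [List.getD_eq_getElem?_getD, List.drop_eq_getElem_cons hi]
      simp [List.getElem?_eq_getElem hi]
    have hb : b.drop i = b.getD i 0 :: b.drop (i + 1) := by
      have hi' : i < b.length := h ▸ hi
      rw [List.getD_eq_getElem?_getD, List.drop_eq_getElem_cons hi']
      simp [List.getElem?_eq_getElem hi']
    rw [does_match_loop_eq a b h (i + 1), ha, hb]
    by_cases hx : a.getD i 0 = b.getD i 0
    · rw [hx]; simp
    · have hne : ¬ (a.getD i 0 :: List.drop (i + 1) a = b.getD i 0 :: List.drop (i + 1) b) :=
        fun hc => hx (List.cons_eq_cons.mp hc).1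
      rw [if_pos hx]
      exact (decide_eq_false hne).symm
  · rw [does_match_loop]
    simp only [hi, if_false]
    rw [List.drop_eq_nil_of_le (by omega), List.drop_eq_nil_of_le (by omega)]
    simp
termination_by a.length - i

-- ===== VERDICT (by name: the statement is the Claim_ definition above) =====
theorem does_match_spec : Claim_equal_does_match := by
  intro a b _
  unfold Spec_does_match does_match_alt
  by_cases h : a.length = b.length
  · simp only [h, ne_eq, not_true_eq_false, if_false]
    rw [does_match_eq_decide, ← h, does_match_loop_eq a b h 0]
    simp
  · simp only [ne_eq, h, not_false_eq_true, if_true]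
    rw [does_match_eq_decide]
    simp
    intro he; exact h (he ▸ rfl)
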